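-- pv_equiv track=rewrite | github.com/ziemlaur/pirma_aplikacija | 13/assert.py | poriniaiIndexai
-- ===== SOURCE A (Python) =====
-- def poriniaiIndexai(data):
--     listas = []
--     for i, sk in enumerate(data):
--         if i %2 == 0 and sk >= 15:
--             listas.append(0)
--         else:
--             listas.append(sk)
--     return listas
-- ===== SOURCE B (Python) =====
-- def poriniaiIndexai(data):
--     res = list(data)
--     for k in range((len(data) + 1) // 2):
--         if res[2 * k] >= 15:
--             res[2 * k] = 0
--     return res
-- ===== Notes on version B (the rewrite author's own statement) =====
-- stated objective: alternative
-- what changed: A builds a new list element by element, testing i % 2 on every index; B copies the input once and then walks only the even positions (k -> 2k over half the range), zeroing entries >= 15 in place, so the parity test disappears from the loop.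
import Mathlib
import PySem

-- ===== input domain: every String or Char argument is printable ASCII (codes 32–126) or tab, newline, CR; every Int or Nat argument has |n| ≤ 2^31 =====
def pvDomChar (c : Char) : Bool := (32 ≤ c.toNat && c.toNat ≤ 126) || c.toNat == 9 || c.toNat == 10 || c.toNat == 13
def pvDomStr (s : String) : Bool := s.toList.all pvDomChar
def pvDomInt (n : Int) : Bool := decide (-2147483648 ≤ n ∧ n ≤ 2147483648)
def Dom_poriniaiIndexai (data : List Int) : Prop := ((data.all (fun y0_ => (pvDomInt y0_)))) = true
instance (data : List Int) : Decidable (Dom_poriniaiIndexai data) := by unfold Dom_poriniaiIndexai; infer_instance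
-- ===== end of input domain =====

-- B copies the input once and patches only the even positions (k -> 2k), instead of A's
-- per-element loop that tests i % 2 on every index; same O(n) cost, different decomposition.


-- ===== PORT A =====
def poriniaiIndexai (data : List Int) : List Int :=
  (PySem.List.enumerate data).foldl
    (fun listas p =>
      if PySem.Int.mod p.1 2 = 0 ∧ 15 ≤ p.2 then listas ++ [0] else listas ++ [p.2])
    []

-- ===== PORT B =====
def poriniaiIndexai_alt (data : List Int) : List Int :=
  (PySem.List.pyRange 0 (PySem.Int.floordiv ((data.length : Int) + 1) 2) 1).foldl
    (fun res k =>
      if 15 ≤ PySem.List.pyGetD res (2 * k) 0 then PySem.List.pySetD res (2 * k) 0 else res)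
    data

-- ===== PRECONDITION & SPEC =====
def Spec_poriniaiIndexai (data : List Int) (out : List Int) : Prop := out = poriniaiIndexai_alt data
instance (data : List Int) (out : List Int) : Decidable (Spec_poriniaiIndexai data out) := by unfold Spec_poriniaiIndexai; infer_instance

-- ===== CLAIM (what is proved, stated in full; the proofs are below) =====
def Claim_equal_poriniaiIndexai : Prop := ∀ (data : List Int), Dom_poriniaiIndexai data → Spec_poriniaiIndexai data (poriniaiIndexai data)

-- ===== LEMMAS AND PROOFS =====

-- A as a map over enumerate
theorem A_eq_map (data : List Int) :
    poriniaiIndexai data =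
      (PySem.List.enumerate data).map
        (fun p => if PySem.Int.mod p.1 2 = 0 ∧ 15 ≤ p.2 then 0 else p.2) := by
  unfold poriniaiIndexai
  have hf : (fun (listas : List Int) (p : Int × Int) =>
      if PySem.Int.mod p.1 2 = 0 ∧ 15 ≤ p.2 then listas ++ [0] else listas ++ [p.2])
      = fun listas p =>
        listas ++ [if PySem.Int.mod p.1 2 = 0 ∧ 15 ≤ p.2 then 0 else p.2] := by
    funext l p; split <;> rfl
  rw [hf, PySem.List.foldl_append_singleton_eq_map]
  simp

-- the loop body of B over Nat indices
def Bstep (res : List Int) (k : Nat) : List Int :=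
  if 15 ≤ res.getD (2 * k) 0 then res.set (2 * k) 0 else res

theorem Bstep_eq (res : List Int) (k : Nat) :
    (if 15 ≤ PySem.List.pyGetD res (2 * (0 + (k : Int))) 0
      then PySem.List.pySetD res (2 * (0 + (k : Int))) 0 else res) = Bstep res k := by
  have h2 : 2 * (0 + (k : Int)) = ((2 * k : Nat) : Int) := by push_cast; ring
  rw [h2, PySem.List.pyGetD_natCast, PySem.List.pySetD_natCast, Bstep]

-- invariant of the B loop
theorem loop_inv (data : List Int) (m : Nat) (hm : m ≤ (data.length + 1) / 2) :
    ((List.range m).foldl Bstep data).length = data.length ∧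
    ∀ i : Nat, ((List.range m).foldl Bstep data).getD i 0 =
      if i % 2 = 0 ∧ i < 2 * m ∧ 15 ≤ data.getD i 0 then 0 else data.getD i 0 := by
  induction m with
  | zero => simp
  | succ m ih =>
    have hm' : m ≤ (data.length + 1) / 2 := by omega
    obtain ⟨hlen, hget⟩ := ih hm'
    have h2m : 2 * m < data.length := by omega
    rw [List.range_succ, List.foldl_append]
    set L := (List.range m).foldl Bstep data with hL
    have hLcur : L.getD (2 * m) 0 = data.getD (2 * m) 0 := by
      rw [hget (2 * m)]; simp
    constructor
    · simp only [List.foldl_cons, List.foldl_nil, Bstep]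
      split <;> simp [hlen]
    · intro i
      simp only [List.foldl_cons, List.foldl_nil, Bstep, hLcur]
      by_cases hd : 15 ≤ data.getD (2 * m) 0
      · rw [if_pos hd]
        by_cases hi : i = 2 * m
        · subst hi
          rw [List.getD_eq_getElem?_getD, List.getElem?_set_self (by omega), Option.getD_some]
          rw [if_pos ⟨by omega, by omega, hd⟩]
        · rw [List.getD_eq_getElem?_getD, List.getElem?_set_ne (by omega),
              ← List.getD_eq_getElem?_getD, hget i]
          split_ifs <;> omega
      · rw [if_neg hd, hget i]
        by_cases hi : i = 2 * m
        · subst hi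
          split_ifs <;> omega
        · split_ifs <;> omega

-- B as the Nat-indexed loop
theorem B_eq_loop (data : List Int) :
    poriniaiIndexai_alt data = (List.range ((data.length + 1) / 2)).foldl Bstep data := by
  unfold poriniaiIndexai_alt
  have hM : PySem.Int.floordiv ((data.length : Int) + 1) 2
      = (((data.length + 1) / 2 : Nat) : Int) := by
    have := PySem.Int.floordiv_natCast (data.length + 1) 2
    push_cast at this ⊢
    exact this
  rw [hM, PySem.List.pyRange_one, List.foldl_map]
  have : ((((data.length + 1) / 2 : Nat) : Int) - 0).toNat = (data.length + 1) / 2 := by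
    omega
  rw [this]
  congr 1
  funext res k
  exact Bstep_eq res k

theorem poriniaiIndexai_spec' (data : List Int) :
    poriniaiIndexai data = poriniaiIndexai_alt data := by
  obtain ⟨hlen, hget⟩ := loop_inv data ((data.length + 1) / 2) (le_refl _)
  rw [A_eq_map, B_eq_loop]
  apply List.ext_getElem
  · simpa using hlen.symm
  · intro i h1 h2
    have hi : i < data.length := by simpa using hlen ▸ h2
    have hB : ((List.range ((data.length + 1) / 2)).foldl Bstep data)[i] =
        ((List.range ((data.length + 1) / 2)).foldl Bstep data).getD i 0 :=
      (List.getD_eq_getElem _ _ h2).symm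
    rw [hB, hget i, List.getElem_map, PySem.List.getElem_enumerate]
    have hdg : data.getD i 0 = data[i] := List.getD_eq_getElem data 0 hi
    have hmod : PySem.Int.mod ((0 : Int) + (i : Nat)) 2 = ((i % 2 : Nat) : Int) := by
      rw [PySem.Int.mod_eq_emod_of_pos (by omega : (0:Int) < 2)]
      omega
    rw [hmod, hdg]
    split_ifs <;> omega

-- ===== VERDICT (by name: the statement is the Claim_ definition above) =====
theorem poriniaiIndexai_spec : Claim_equal_poriniaiIndexai := by
  intro data _
  exact poriniaiIndexai_spec' data
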